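-- pv_equiv track=rewrite | github.com/JVZELLER/digital_image_processing | src/DIP/Image.py | find_license_plate
-- ===== SOURCE A (Python) =====
-- def find_license_plate (license_plate_areas, license_plate_values):
--     pixels = [0,0,0,1000] # start_X, start_Y, max_value, min_value
--     final = [0, 0, 0]
--     flag = True
--     while flag:
--         flag = False
--         for index in range(len(license_plate_areas)):
--             if license_plate_areas[index]:
--                 area = []
--                 pixels[0] = index # start position
--                 for second in range(index, len(license_plate_areas)):
--                     if license_plate_areas[second] == False:
--                         pixels[1] = second - 1 # end position
--                         break
--                     area.append(license_plate_values[second])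
--
--                 max_value_in_area = max(area)
--                 min_value_in_area = min(area)
--                 diference = max_value_in_area - min_value_in_area
--
-- #                 if max_value_in_area > pixels[2]:
-- #                     pixels[2] = max_value_in_area
-- #                 if min_value_in_area < pixels[3]:
-- #                     pixels[3] = min_value_in_area
--
--                 if diference > final[2]:
--                     final = [pixels[0], pixels[1], diference]
--                     flag = True
--     return final
-- ===== SOURCE B (Python) =====
-- def find_license_plate(license_plate_areas, license_plate_values):
--     # single pass over maximal True-runs, tracking min/max per run; O(n)
--     best = [0, 0, 0]
--     i = 0
--     n = len(license_plate_areas)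
--     while i < n:
--         if license_plate_areas[i]:
--             j = i
--             lo = license_plate_values[i]
--             hi = lo
--             while j + 1 < n and license_plate_areas[j + 1]:
--                 j += 1
--                 v = license_plate_values[j]
--                 if v < lo:
--                     lo = v
--                 if v > hi:
--                     hi = v
--             if hi - lo > best[2]:
--                 best = [i, j, hi - lo]
--             i = j + 1
--         else:
--             i += 1
--     return best
-- ===== Notes on version B (the rewrite author's own statement) =====
-- stated objective: alternative
-- what changed: B makes one left-to-right pass over maximal True-runs, tracking the run's min and max incrementally, instead of A's repeated whole-array passes that rescan the rest of the run from every True index.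
-- intended difference: When the best run (the first maximal True-run with the largest max-min difference, which must be positive) reaches the end of the list, A returns a stale end index (0 or the end of an earlier closed run) because its inner loop only records the end position when it meets a False; B returns the run's actual last index, which is the intended end position. — e.g. on find_license_plate([true, true], [0, 5]): A returns [0, 0, 5], B returns [0, 1, 5]
import Mathlib
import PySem

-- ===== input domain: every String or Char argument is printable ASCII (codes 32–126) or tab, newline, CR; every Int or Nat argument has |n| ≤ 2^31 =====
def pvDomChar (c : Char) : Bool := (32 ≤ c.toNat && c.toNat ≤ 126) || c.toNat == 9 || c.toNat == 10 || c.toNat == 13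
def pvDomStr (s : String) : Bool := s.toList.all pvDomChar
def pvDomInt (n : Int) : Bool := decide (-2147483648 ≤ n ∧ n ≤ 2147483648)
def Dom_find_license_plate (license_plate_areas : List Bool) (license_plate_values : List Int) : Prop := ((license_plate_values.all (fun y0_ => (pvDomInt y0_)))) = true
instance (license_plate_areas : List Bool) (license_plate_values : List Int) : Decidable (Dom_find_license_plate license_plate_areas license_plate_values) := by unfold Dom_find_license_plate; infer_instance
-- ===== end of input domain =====

-- B replaces A's repeated whole-array rescans with one left-to-right pass over maximal True-runs,
-- tracking each run's min/max incrementally; on inputs where the best run reaches the end of the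
-- list, A returns a stale end index and B returns the run's actual last index (see D_).


-- ===== PORT A =====
-- A's inner `for second in range(index, len(areas))` loop: accumulates `area`, sets
-- pixels[1] = second - 1 on break, otherwise leaves it unchanged (stale). The fuel
-- `areas.length - second` is exactly the number of remaining loop indices.
def innerGo (areas : List Bool) (values : List Int) :
    Nat → Nat → List Int → Int → List Int × Int
  | 0, _, area, p1 => (area, p1)
  | fuel + 1, second, area, p1 =>
    if second < areas.length then
      if areas.getD second false = false then (area, (second : Int) - 1)
      -- values[second]: raises IndexError iff second ≥ values.length; excluded by Pre_
      else innerGo areas values fuel (second + 1)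
             (area ++ [PySem.List.pyGetD values (second : Int) 0]) p1
    else (area, p1)

def innerLoop (areas : List Bool) (values : List Int) (second : Nat) (area : List Int)
    (p1 : Int) : List Int × Int :=
  innerGo areas values (areas.length - second) second area p1

-- body of A's `for index in range(len(areas))` loop; state = (pixels[1], final, flag)
def stepA (areas : List Bool) (values : List Int) (s : Int × (Int × Int × Int) × Bool)
    (index : Nat) : Int × (Int × Int × Int) × Bool :=
  if areas.getD index false = true then
    let r := innerLoop areas values index [] s.1
    let mx := (PySem.List.max? r.1 (fun y => y)).getD 0
    let mn := (PySem.List.min? r.1 (fun y => y)).getD 0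
    let d := mx - mn
    if d > s.2.1.2.2 then (r.2, ((index : Int), r.2, d), true)
    else (r.2, s.2.1, s.2.2)
  else s

-- one iteration of A's `while flag` body (flag := False at its top)
def passA (areas : List Bool) (values : List Int) (p1 : Int) (f : Int × Int × Int) :
    Int × (Int × Int × Int) × Bool :=
  (List.range areas.length).foldl (stepA areas values) (p1, f, false)

-- A's `while flag` loop. Fuel 2 is exact for the initial state A uses: a pass either sets flag
-- together with a strict increase of final[2] past every run difference, or clears flag; so the
-- second pass never sets flag (proved in pass_bounds/pass_noop/whileGo_two below).
def whileGo (areas : List Bool) (values : List Int) :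
    Nat → Int → Int × Int × Int → Int × Int × Int
  | 0, _, f => f
  | fuel + 1, p1, f =>
    let r := passA areas values p1 f
    if r.2.2 = true then whileGo areas values fuel r.1 r.2.1 else r.2.1

def find_license_plate (license_plate_areas : List Bool) (license_plate_values : List Int) :
    List Int :=
  let f := whileGo license_plate_areas license_plate_values 2 0 (0, 0, 0)
  [f.1, f.2.1, f.2.2]

-- ===== PORT B =====
-- B's inner `while j + 1 < n and areas[j+1]` loop, carrying (j, lo, hi);
-- fuel `areas.length - j` is exactly the number of possible increments of j.
def extendGo (areas : List Bool) (values : List Int) :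
    Nat → Nat → Int → Int → Nat × Int × Int
  | 0, j, lo, hi => (j, lo, hi)
  | fuel + 1, j, lo, hi =>
    if j + 1 < areas.length ∧ areas.getD (j + 1) false = true then
      let v := PySem.List.pyGetD values ((j + 1 : Nat) : Int) 0
      extendGo areas values fuel (j + 1) (if v < lo then v else lo) (if v > hi then v else hi)
    else (j, lo, hi)

def extendRun (areas : List Bool) (values : List Int) (j : Nat) (lo hi : Int) :
    Nat × Int × Int :=
  extendGo areas values (areas.length - j) j lo hi

-- B's outer `while i < n` loop; i strictly increases, so fuel `areas.length - i + 1` is enough.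
def bGo (areas : List Bool) (values : List Int) :
    Nat → Nat → Int × Int × Int → Int × Int × Int
  | 0, _, best => best
  | fuel + 1, i, best =>
    if i < areas.length then
      if areas.getD i false = true then
        let v := PySem.List.pyGetD values ((i : Nat) : Int) 0
        let t := extendRun areas values i v v
        bGo areas values fuel (t.1 + 1)
          (if t.2.2 - t.2.1 > best.2.2 then ((i : Int), (t.1 : Int), t.2.2 - t.2.1) else best)
      else bGo areas values fuel (i + 1) best
    else best

def bLoop (areas : List Bool) (values : List Int) (i : Nat) (best : Int × Int × Int) :
    Int × Int × Int :=
  bGo areas values (areas.length - i + 1) i best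

def find_license_plate_alt (license_plate_areas : List Bool) (license_plate_values : List Int) :
    List Int :=
  let b := bLoop license_plate_areas license_plate_values 0 (0, 0, 0)
  [b.1, b.2.1, b.2.2]

-- ===== PRECONDITION & SPEC =====
-- Pre_ excludes exactly the inputs where Python A raises IndexError: some True position in
-- license_plate_areas has no corresponding entry in license_plate_values (B raises there too).
def Pre_find_license_plate (license_plate_areas : List Bool) (license_plate_values : List Int) : Prop :=
  ∀ i ∈ List.range license_plate_areas.length,
    license_plate_areas.getD i false = true → i < license_plate_values.length
instance (license_plate_areas : List Bool) (license_plate_values : List Int) :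
    Decidable (Pre_find_license_plate license_plate_areas license_plate_values) := by
  unfold Pre_find_license_plate; infer_instance

def pvWitness_find_license_plate : List Bool × List Int := ([true, true, false], [0, 5, 0])

-- helper for D_ (input-only; it does not touch either port): scan the paired list run by run,
-- keeping the best max-min difference seen; true iff a run that strictly beats everything before it
-- (and 0) extends to the very end of the list. Fuel = list length (each step drops ≥ 1 element).
def lastRunWinsGo : Nat → List (Bool × Int) → Int → Bool
  | 0, _, _ => false
  | _ + 1, [], _ => false
  | fuel + 1, (false, _) :: t, best => lastRunWinsGo fuel t best
  | fuel + 1, (true, v) :: t, best =>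
    let run := v :: (t.takeWhile Prod.fst).map Prod.snd
    let rest := t.dropWhile Prod.fst
    let d := (run.max?.getD 0) - (run.min?.getD 0)
    if best < d then (rest.isEmpty || lastRunWinsGo fuel rest d)
    else lastRunWinsGo fuel rest best

def lastRunWins (l : List (Bool × Int)) (best : Int) : Bool := lastRunWinsGo l.length l best

-- When the winning run (the first maximal True-run with the largest, positive, max-min difference)
-- reaches the end of the list, A returns a stale end index (0 or the end of an earlier closed run)
-- because its inner loop records the end position only upon meeting a False; B returns that run's
-- actual last index, which is the intended end position.
def D_find_license_plate (license_plate_areas : List Bool) (license_plate_values : List Int) : Prop :=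
  license_plate_areas.getLast? = some true ∧
  lastRunWins (license_plate_areas.zip license_plate_values) 0 = true
instance (license_plate_areas : List Bool) (license_plate_values : List Int) :
    Decidable (D_find_license_plate license_plate_areas license_plate_values) := by
  unfold D_find_license_plate; infer_instance

def Spec_find_license_plate (license_plate_areas : List Bool) (license_plate_values : List Int)
    (out : List Int) : Prop :=
  ¬ D_find_license_plate license_plate_areas license_plate_values →
    out = find_license_plate_alt license_plate_areas license_plate_values
instance (license_plate_areas : List Bool) (license_plate_values : List Int) (out : List Int) :
    Decidable (Spec_find_license_plate license_plate_areas license_plate_values out) := by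
  unfold Spec_find_license_plate; infer_instance

def pvDiffWitness_find_license_plate : List Bool × List Int := ([true, true], [0, 5])
def pvDiffWitnessOut_find_license_plate : (List Int) × (List Int) := ([0, 0, 5], [0, 1, 5])

-- ===== CLAIM (what is proved, stated in full; the proofs are below) =====
def Claim_unchanged_find_license_plate : Prop :=
  ∀ (license_plate_areas : List Bool) (license_plate_values : List Int),
    Dom_find_license_plate license_plate_areas license_plate_values →
    Pre_find_license_plate license_plate_areas license_plate_values →
    Spec_find_license_plate license_plate_areas license_plate_values
      (find_license_plate license_plate_areas license_plate_values)

def Claim_changed_find_license_plate : Prop :=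
  Dom_find_license_plate (pvDiffWitness_find_license_plate.1) (pvDiffWitness_find_license_plate.2) ∧
  Pre_find_license_plate (pvDiffWitness_find_license_plate.1) (pvDiffWitness_find_license_plate.2) ∧
  D_find_license_plate (pvDiffWitness_find_license_plate.1) (pvDiffWitness_find_license_plate.2) ∧
  find_license_plate (pvDiffWitness_find_license_plate.1) (pvDiffWitness_find_license_plate.2)
    = pvDiffWitnessOut_find_license_plate.1 ∧
  find_license_plate_alt (pvDiffWitness_find_license_plate.1) (pvDiffWitness_find_license_plate.2)
    = pvDiffWitnessOut_find_license_plate.2 ∧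
  pvDiffWitnessOut_find_license_plate.1 ≠ pvDiffWitnessOut_find_license_plate.2

-- ===== LEMMAS AND PROOFS =====

-- proof-side run analysis helpers:
-- runEndD areas k = the first position j ≥ k where areas is not True (areas.length if none)
def runEndGo (areas : List Bool) : Nat → Nat → Nat
  | 0, k => k
  | fuel + 1, k =>
    if k < areas.length ∧ areas.getD k false = true then runEndGo areas fuel (k + 1) else k

def runEndD (areas : List Bool) (k : Nat) : Nat := runEndGo areas (areas.length - k) k

def segD (values : List Int) (s e : Nat) : List Int :=
  (List.range' s (e - s)).map (fun j => values.getD j 0)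

def listMax : List Int → Int
  | [] => 0
  | x :: t => t.foldl max x

def listMin : List Int → Int
  | [] => 0
  | x :: t => t.foldl min x

-- max-min difference of the values under positions [s, e)
def runDiffD (values : List Int) (s e : Nat) : Int :=
  listMax (segD values s e) - listMin (segD values s e)

-- ---- runEndD ----
lemma runEndD_eq (areas : List Bool) (k : Nat) :
    runEndD areas k
      = if k < areas.length ∧ areas.getD k false = true then runEndD areas (k + 1) else k := by
  unfold runEndD
  by_cases h : k < areas.length ∧ areas.getD k false = true
  · have hk : areas.length - k = (areas.length - (k + 1)) + 1 := by omega
    rw [hk]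
    simp [runEndGo, h]
  · rcases hn : areas.length - k with _ | m
    · simp only [runEndGo]; rw [if_neg h]
    · simp only [runEndGo]; rw [if_neg h, if_neg h]

lemma runEndD_le (areas : List Bool) : ∀ k, k ≤ runEndD areas k := by
  intro k
  induction hm : areas.length - k using Nat.strong_induction_on generalizing k with
  | _ m ih =>
    rw [runEndD_eq]
    by_cases h : k < areas.length ∧ areas.getD k false = true
    · rw [if_pos h]
      have := ih (areas.length - (k + 1)) (by omega) (k + 1) rfl
      omega
    · rw [if_neg h]

lemma runEndD_le_len (areas : List Bool) : ∀ k, k ≤ areas.length → runEndD areas k ≤ areas.length := by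
  intro k
  induction hm : areas.length - k using Nat.strong_induction_on generalizing k with
  | _ m ih =>
    intro hk
    rw [runEndD_eq]
    by_cases h : k < areas.length ∧ areas.getD k false = true
    · rw [if_pos h]
      exact ih (areas.length - (k + 1)) (by omega) (k + 1) rfl (by omega)
    · rw [if_neg h]; exact hk

lemma runEndD_all_true (areas : List Bool) :
    ∀ k j, k ≤ j → j < runEndD areas k → areas.getD j false = true := by
  intro k
  induction hm : areas.length - k using Nat.strong_induction_on generalizing k with
  | _ m ih =>
    intro j hkj hj
    rw [runEndD_eq] at hj
    by_cases h : k < areas.length ∧ areas.getD k false = true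
    · rw [if_pos h] at hj
      rcases Nat.eq_or_lt_of_le hkj with rfl | hlt
      · exact h.2
      · exact ih (areas.length - (k + 1)) (by omega) (k + 1) rfl j hlt hj
    · rw [if_neg h] at hj; omega

lemma runEndD_end_false (areas : List Bool) :
    ∀ k, areas.getD (runEndD areas k) false = false := by
  intro k
  induction hm : areas.length - k using Nat.strong_induction_on generalizing k with
  | _ m ih =>
    rw [runEndD_eq]
    by_cases h : k < areas.length ∧ areas.getD k false = true
    · rw [if_pos h]
      exact ih (areas.length - (k + 1)) (by omega) (k + 1) rfl
    · rw [if_neg h]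
      by_cases hk : k < areas.length
      · rcases not_and_or.mp h with h1 | h2
        · exact absurd hk h1
        · simpa using h2
      · exact List.getD_eq_default _ _ (by omega)

lemma runEndD_reach (areas : List Bool) (E : Nat) (hEf : areas.getD E false = false) :
    ∀ j, j ≤ E → (∀ t, j ≤ t → t < E → areas.getD t false = true) → runEndD areas j = E := by
  intro j
  induction hm : E - j using Nat.strong_induction_on generalizing j with
  | _ m ih =>
    intro hjE htrue
    rcases Nat.eq_or_lt_of_le hjE with rfl | hlt
    · rw [runEndD_eq]
      rw [if_neg (fun hc => Bool.false_ne_true (hEf ▸ hc.2))]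
    · have hj : areas.getD j false = true := htrue j le_rfl hlt
      have hjlen : j < areas.length := by
        by_contra hc
        rw [List.getD_eq_default _ _ (by omega)] at hj
        exact absurd hj (by simp)
      rw [runEndD_eq]
      rw [if_pos ⟨hjlen, hj⟩]
      exact ih (E - (j + 1)) (by omega) (j + 1) rfl (by omega)
        (fun t ht1 ht2 => htrue t (by omega) ht2)

-- ---- segments and extrema ----
lemma segD_cons (values : List Int) (s e : Nat) (h : s < e) :
    segD values s e = values.getD s 0 :: segD values (s + 1) e := by
  unfold segD
  have he : e - s = (e - (s + 1)) + 1 := by omega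
  rw [he, List.range'_succ]
  simp

lemma foldl_max_le_of (t : List Int) : ∀ (a b : Int), a ≤ b → (∀ y ∈ t, y ≤ b) → t.foldl max a ≤ b := by
  induction t with
  | nil => intro a b hab _; simpa using hab
  | cons x t ih =>
    intro a b hab h
    simp only [List.foldl_cons]
    exact ih _ _ (max_le hab (h x (by simp))) (fun y hy => h y (by simp [hy]))

lemma le_foldl_min_of (t : List Int) : ∀ (a b : Int), b ≤ a → (∀ y ∈ t, b ≤ y) → b ≤ t.foldl min a := by
  induction t with
  | nil => intro a b hab _; simpa using hab
  | cons x t ih =>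
    intro a b hab h
    simp only [List.foldl_cons]
    exact ih _ _ (le_min hab (h x (by simp))) (fun y hy => h y (by simp [hy]))

lemma mem_le_listMax (l : List Int) : ∀ y ∈ l, y ≤ listMax l := by
  rcases l with _ | ⟨x, t⟩
  · simp
  · intro y hy
    rcases List.mem_cons.mp hy with rfl | hyt
    · exact (PySem.List.le_foldl_max t y).1
    · exact (PySem.List.le_foldl_max t x).2 y hyt

lemma listMin_le_mem (l : List Int) : ∀ y ∈ l, listMin l ≤ y := by
  rcases l with _ | ⟨x, t⟩
  · simp
  · intro y hy
    rcases List.mem_cons.mp hy with rfl | hyt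
    · exact (PySem.List.foldl_min_le t y).1
    · exact (PySem.List.foldl_min_le t x).2 y hyt

lemma listMax_le (l : List Int) (b : Int) (hne : l ≠ []) (h : ∀ y ∈ l, y ≤ b) :
    listMax l ≤ b := by
  rcases l with _ | ⟨x, t⟩
  · exact absurd rfl hne
  · exact foldl_max_le_of t x b (h x (by simp)) (fun y hy => h y (by simp [hy]))

lemma le_listMin (l : List Int) (b : Int) (hne : l ≠ []) (h : ∀ y ∈ l, b ≤ y) :
    b ≤ listMin l := by
  rcases l with _ | ⟨x, t⟩
  · exact absurd rfl hne
  · exact le_foldl_min_of t x b (h x (by simp)) (fun y hy => h y (by simp [hy]))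

lemma segD_subset (values : List Int) (s j e : Nat) (hsj : s ≤ j) :
    ∀ y ∈ segD values j e, y ∈ segD values s e := by
  intro y hy
  unfold segD at hy ⊢
  rcases List.mem_map.mp hy with ⟨m, hm, rfl⟩
  rcases List.mem_range'_1.mp hm with ⟨hm1, hm2⟩
  exact List.mem_map.mpr ⟨m, List.mem_range'_1.mpr ⟨by omega, by omega⟩, rfl⟩

lemma segD_ne_nil (values : List Int) (s e : Nat) (h : s < e) : segD values s e ≠ [] := by
  rw [segD_cons values s e h]; simp

lemma runDiffD_suffix_le (values : List Int) (s j e : Nat) (hsj : s ≤ j) (hje : j < e) :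
    runDiffD values j e ≤ runDiffD values s e := by
  unfold runDiffD
  have hmax : listMax (segD values j e) ≤ listMax (segD values s e) :=
    listMax_le _ _ (segD_ne_nil values j e hje)
      (fun y hy => mem_le_listMax _ y (segD_subset values s j e hsj y hy))
  have hmin : listMin (segD values s e) ≤ listMin (segD values j e) :=
    le_listMin _ _ (segD_ne_nil values j e hje)
      (fun y hy => listMin_le_mem _ y (segD_subset values s j e hsj y hy))
  omega

-- ---- characterization of the ports' inner loops ----
lemma segD_self (values : List Int) (s : Nat) : segD values s s = [] := by
  unfold segD
  simp

lemma innerLoop_eq (areas : List Bool) (values : List Int) :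
    ∀ s acc p1, innerLoop areas values s acc p1 =
      (acc ++ segD values s (runEndD areas s),
       if runEndD areas s < areas.length then ((runEndD areas s : Int) - 1) else p1) := by
  intro s
  induction hm : areas.length - s using Nat.strong_induction_on generalizing s with
  | _ m ih =>
    intro acc p1
    unfold innerLoop
    by_cases hs : s < areas.length
    · have hfuel : areas.length - s = (areas.length - (s + 1)) + 1 := by omega
      rw [hfuel]
      simp only [innerGo]
      rw [if_pos hs]
      by_cases hf : areas.getD s false = false
      · rw [if_pos hf]
        have hE : runEndD areas s = s := by
          rw [runEndD_eq, if_neg (fun hc => Bool.false_ne_true (hf ▸ hc.2))]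
        rw [hE, segD_self, if_pos hs]
        simp
      · rw [if_neg hf]
        have ht : areas.getD s false = true := by
          cases hb : areas.getD s false with
          | false => exact absurd hb hf
          | true => rfl
        have hE : runEndD areas s = runEndD areas (s + 1) := by
          rw [runEndD_eq, if_pos ⟨hs, ht⟩]
        have := ih (areas.length - (s + 1)) (by omega) (s + 1) rfl
          (acc ++ [PySem.List.pyGetD values (s : Int) 0]) p1
        rw [show innerGo areas values (areas.length - (s + 1)) (s + 1)
              (acc ++ [PySem.List.pyGetD values (s : Int) 0]) p1
            = innerLoop areas values (s + 1) (acc ++ [PySem.List.pyGetD values (s : Int) 0]) p1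
          from rfl, this, hE]
      -- acc ++ [v] ++ segD (s+1) E = acc ++ segD s E
        have hsE : s < runEndD areas (s + 1) := by
          have := runEndD_le areas (s + 1); omega
        rw [segD_cons values s (runEndD areas (s + 1)) hsE]
        simp [PySem.List.pyGetD_natCast]
    · have hfuel : areas.length - s = 0 := by omega
      rw [hfuel]
      simp only [innerGo]
      have hE : runEndD areas s = s := by
        rw [runEndD_eq, if_neg (fun hc => hs hc.1)]
      rw [hE, segD_self, if_neg hs]
      simp

lemma stepA_diff (areas : List Bool) (values : List Int) (p1 : Int) (f : Int × Int × Int)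
    (fl : Bool) (i : Nat) (ha : areas.getD i false = true) :
    stepA areas values (p1, f, fl) i =
      (if runEndD areas i < areas.length then ((runEndD areas i : Int) - 1) else p1,
       if runDiffD values i (runEndD areas i) > f.2.2 then
         (((i : Int),
           if runEndD areas i < areas.length then ((runEndD areas i : Int) - 1) else p1,
           runDiffD values i (runEndD areas i)), true)
       else (f, fl)) := by
  have hilen : i < areas.length := by
    by_contra hc
    rw [List.getD_eq_default _ _ (by omega)] at ha
    exact Bool.false_ne_true ha
  have hiE : i < runEndD areas i := by
    rw [runEndD_eq, if_pos ⟨hilen, ha⟩]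
    have := runEndD_le areas (i + 1); omega
  unfold stepA
  rw [if_pos ha, innerLoop_eq]
  simp only [List.nil_append]
  rw [segD_cons values i (runEndD areas i) hiE]
  rw [PySem.List.max?_id_cons, PySem.List.min?_id_cons]
  have hd : (segD values (i + 1) (runEndD areas i)).foldl max (values.getD i 0)
      - (segD values (i + 1) (runEndD areas i)).foldl min (values.getD i 0)
      = runDiffD values i (runEndD areas i) := by
    unfold runDiffD
    rw [segD_cons values i (runEndD areas i) hiE]
    rfl
  simp only [Option.getD_some, hd]
  by_cases hgt : runDiffD values i (runEndD areas i) > f.2.2 <;> simp [hgt]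

lemma if_lt_eq_min (v lo : Int) : (if v < lo then v else lo) = min lo v := by
  rw [min_def]; split_ifs <;> omega

lemma if_gt_eq_max (v hi : Int) : (if v > hi then v else hi) = max hi v := by
  rw [max_def]; split_ifs <;> omega

lemma extendRun_eq (areas : List Bool) (values : List Int) :
    ∀ j lo hi, extendRun areas values j lo hi =
      (runEndD areas (j + 1) - 1,
       (segD values (j + 1) (runEndD areas (j + 1))).foldl min lo,
       (segD values (j + 1) (runEndD areas (j + 1))).foldl max hi) := by
  intro j
  induction hm : areas.length - j using Nat.strong_induction_on generalizing j with
  | _ m ih =>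
    intro lo hi
    unfold extendRun
    by_cases h : j + 1 < areas.length ∧ areas.getD (j + 1) false = true
    · have hfuel : areas.length - j = (areas.length - (j + 1)) + 1 := by omega
      rw [hfuel]
      simp only [extendGo]
      rw [if_pos h]
      have := ih (areas.length - (j + 1)) (by omega) (j + 1) rfl
        (if PySem.List.pyGetD values ((j + 1 : Nat) : Int) 0 < lo
          then PySem.List.pyGetD values ((j + 1 : Nat) : Int) 0 else lo)
        (if PySem.List.pyGetD values ((j + 1 : Nat) : Int) 0 > hi
          then PySem.List.pyGetD values ((j + 1 : Nat) : Int) 0 else hi)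
      rw [show extendGo areas values (areas.length - (j + 1)) (j + 1) _ _
            = extendRun areas values (j + 1) _ _ from rfl, this]
      have hE : runEndD areas (j + 1) = runEndD areas (j + 2) := by
        rw [runEndD_eq, if_pos h]
      have hj1E : j + 1 < runEndD areas (j + 2) := by
        have := runEndD_le areas (j + 2); omega
      rw [← hE, hE, segD_cons values (j + 1) (runEndD areas (j + 2)) hj1E]
      simp only [List.foldl_cons]
      rw [PySem.List.pyGetD_natCast, if_lt_eq_min, if_gt_eq_max]
    · have hE : runEndD areas (j + 1) = j + 1 := by
        rw [runEndD_eq, if_neg h]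
      rcases hfuel : areas.length - j with _ | m'
      · simp only [extendGo]
        rw [hE, segD_self]
        simp
      · simp only [extendGo]
        rw [if_neg h, hE, segD_self]
        simp

-- ---- bLoop equations ----
lemma extendGo_fst_ge (areas : List Bool) (values : List Int) :
    ∀ fuel j lo hi, j ≤ (extendGo areas values fuel j lo hi).1 := by
  intro fuel
  induction fuel with
  | zero => intro j lo hi; exact le_refl j
  | succ f ih =>
    intro j lo hi
    simp only [extendGo]
    split
    · have := ih (j + 1) (if PySem.List.pyGetD values ((j + 1 : Nat) : Int) 0 < lo
          then PySem.List.pyGetD values ((j + 1 : Nat) : Int) 0 else lo)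
        (if PySem.List.pyGetD values ((j + 1 : Nat) : Int) 0 > hi
          then PySem.List.pyGetD values ((j + 1 : Nat) : Int) 0 else hi)
      omega
    · exact le_refl j

lemma bGo_mono (areas : List Bool) (values : List Int) :
    ∀ f1 f2 i (best : Int × Int × Int), areas.length - i < f1 → areas.length - i < f2 →
      bGo areas values f1 i best = bGo areas values f2 i best := by
  intro f1
  induction f1 with
  | zero => intro f2 i best h1 _; omega
  | succ a ih =>
    intro f2 i best h1 h2
    rcases f2 with _ | b
    · omega
    · simp only [bGo]
      by_cases hi : i < areas.length
      · rw [if_pos hi, if_pos hi]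
        by_cases ha : areas.getD i false = true
        · rw [if_pos ha, if_pos ha]
          have hft : i ≤ (extendRun areas values i (PySem.List.pyGetD values ((i : Nat) : Int) 0)
              (PySem.List.pyGetD values ((i : Nat) : Int) 0)).1 := by
            unfold extendRun
            exact extendGo_fst_ge areas values _ i _ _
          set t := extendRun areas values i (PySem.List.pyGetD values ((i : Nat) : Int) 0)
            (PySem.List.pyGetD values ((i : Nat) : Int) 0) with htdef
          exact ih b (t.1 + 1)
            (if t.2.2 - t.2.1 > best.2.2 then ((i : Int), (t.1 : Int), t.2.2 - t.2.1) else best)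
            (by omega) (by omega)
        · rw [if_neg ha, if_neg ha]
          exact ih b (i + 1) best (by omega) (by omega)
      · rw [if_neg hi, if_neg hi]

lemma bLoop_stop (areas : List Bool) (values : List Int) (i : Nat) (best : Int × Int × Int)
    (h : ¬ i < areas.length) : bLoop areas values i best = best := by
  unfold bLoop
  simp only [bGo]
  rw [if_neg h]

lemma bLoop_skip (areas : List Bool) (values : List Int) (i : Nat) (best : Int × Int × Int)
    (hi : i < areas.length) (ha : areas.getD i false = false) :
    bLoop areas values i best = bLoop areas values (i + 1) best := by
  unfold bLoop
  simp only [bGo]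
  rw [if_pos hi, if_neg (fun hc => Bool.false_ne_true (ha ▸ hc))]
  exact bGo_mono areas values (areas.length - i) (areas.length - (i + 1) + 1) (i + 1) best
    (by omega) (by omega)

lemma bLoop_run (areas : List Bool) (values : List Int) (i : Nat) (best : Int × Int × Int)
    (hi : i < areas.length) (ha : areas.getD i false = true) :
    bLoop areas values i best =
      bLoop areas values (runEndD areas i)
        (if runDiffD values i (runEndD areas i) > best.2.2 then
          ((i : Int), ((runEndD areas i : Int) - 1), runDiffD values i (runEndD areas i))
        else best) := by
  have hE : runEndD areas i = runEndD areas (i + 1) := by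
    rw [runEndD_eq, if_pos ⟨hi, ha⟩]
  have hiE : i < runEndD areas i := by
    have := runEndD_le areas (i + 1); omega
  have hElen : runEndD areas i ≤ areas.length := runEndD_le_len areas i (by omega)
  conv_lhs => rw [bLoop]
  simp only [bGo]
  rw [if_pos hi, if_pos ha]
  rw [show extendRun areas values i (PySem.List.pyGetD values ((i : Nat) : Int) 0)
        (PySem.List.pyGetD values ((i : Nat) : Int) 0)
      = (runEndD areas (i + 1) - 1,
         (segD values (i + 1) (runEndD areas (i + 1))).foldl min
           (PySem.List.pyGetD values ((i : Nat) : Int) 0),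
         (segD values (i + 1) (runEndD areas (i + 1))).foldl max
           (PySem.List.pyGetD values ((i : Nat) : Int) 0))
    from extendRun_eq areas values i _ _]
  have hdiff : (segD values (i + 1) (runEndD areas (i + 1))).foldl max
        (PySem.List.pyGetD values ((i : Nat) : Int) 0)
      - (segD values (i + 1) (runEndD areas (i + 1))).foldl min
        (PySem.List.pyGetD values ((i : Nat) : Int) 0)
      = runDiffD values i (runEndD areas i) := by
    unfold runDiffD
    rw [segD_cons values i (runEndD areas i) hiE, ← hE, PySem.List.pyGetD_natCast]
    rfl
  simp only [hdiff]
  have hcastE : ((runEndD areas (i + 1) - 1 : Nat) : Int) = ((runEndD areas i : Int) - 1) := by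
    omega
  have hsucc : runEndD areas (i + 1) - 1 + 1 = runEndD areas i := by omega
  rw [hcastE, hsucc]
  unfold bLoop
  exact bGo_mono areas values (areas.length - i) (areas.length - runEndD areas i + 1)
    (runEndD areas i) _ (by omega) (by omega)

-- ---- lastRunWins step lemmas (relating D_'s scan to run boundaries) ----
lemma lgo_mono : ∀ f1 f2 (l : List (Bool × Int)) (b : Int),
    l.length ≤ f1 → l.length ≤ f2 → lastRunWinsGo f1 l b = lastRunWinsGo f2 l b := by
  intro f1
  induction f1 with
  | zero =>
    intro f2 l b h1 _
    have hl : l = [] := List.length_eq_zero_iff.mp (by omega)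
    subst hl
    cases f2 <;> rfl
  | succ a ih =>
    intro f2 l b h1 h2
    cases f2 with
    | zero =>
      have hl : l = [] := List.length_eq_zero_iff.mp (by omega)
      subst hl
      rfl
    | succ c =>
      cases l with
      | nil => rfl
      | cons p t =>
        rcases p with ⟨bb, v⟩
        rw [List.length_cons] at h1 h2
        cases bb
        · simp only [lastRunWinsGo]
          exact ih c t b (by omega) (by omega)
        · simp only [lastRunWinsGo]
          have hlen : (t.dropWhile Prod.fst).length ≤ t.length := t.length_dropWhile_le Prod.fst
          have e : ∀ b' : Int, lastRunWinsGo a (t.dropWhile Prod.fst) b'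
              = lastRunWinsGo c (t.dropWhile Prod.fst) b' :=
            fun b' => ih c (t.dropWhile Prod.fst) b' (by omega) (by omega)
          rw [e, e]

lemma lastRunWins_cons_false (v : Int) (t : List (Bool × Int)) (b : Int) :
    lastRunWins ((false, v) :: t) b = lastRunWins t b := rfl

lemma lastRunWins_cons_true (v : Int) (t : List (Bool × Int)) (b : Int) :
    lastRunWins ((true, v) :: t) b =
      (if b < ((v :: (t.takeWhile Prod.fst).map Prod.snd).max?.getD 0
            - (v :: (t.takeWhile Prod.fst).map Prod.snd).min?.getD 0)
       then ((t.dropWhile Prod.fst).isEmpty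
          || lastRunWins (t.dropWhile Prod.fst)
              ((v :: (t.takeWhile Prod.fst).map Prod.snd).max?.getD 0
                - (v :: (t.takeWhile Prod.fst).map Prod.snd).min?.getD 0))
       else lastRunWins (t.dropWhile Prod.fst) b) := by
  have hlen : (t.dropWhile Prod.fst).length ≤ t.length := t.length_dropWhile_le Prod.fst
  show lastRunWinsGo (t.length + 1) ((true, v) :: t) b = _
  simp only [lastRunWinsGo]
  have e : ∀ b' : Int, lastRunWinsGo t.length (t.dropWhile Prod.fst) b'
      = lastRunWins (t.dropWhile Prod.fst) b' :=
    fun b' => lgo_mono t.length (t.dropWhile Prod.fst).length (t.dropWhile Prod.fst) b' hlen le_rfl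
  rw [e, e]

-- the drop of the zipped list at a run's start: takeWhile is the run, dropWhile jumps to its end
lemma zip_run_split (areas : List Bool) (values : List Int) (E : Nat)
    (hEf : areas.getD E false = false) (hEV : E ≤ values.length) :
    ∀ m k, k + m = E → (∀ j, k ≤ j → j < E → areas.getD j false = true) →
      (((areas.zip values).drop k).takeWhile Prod.fst).map Prod.snd = segD values k E ∧
      ((areas.zip values).drop k).dropWhile Prod.fst = (areas.zip values).drop E := by
  intro m
  induction m with
  | zero =>
    intro k hk _
    subst hk
    simp only [Nat.add_zero] at *
    by_cases hlt : k < (areas.zip values).length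
    · rw [List.drop_eq_getElem_cons hlt]
      have hzl : (areas.zip values).length = min areas.length values.length := List.length_zip
      have hka : k < areas.length := by omega
      have hfalse : (areas.zip values)[k].1 = false := by
        rw [List.getElem_zip]
        rw [← List.getD_eq_getElem areas false hka]
        exact hEf
      rw [List.takeWhile_cons, List.dropWhile_cons]
      rw [hfalse]
      simp [segD_self]
    · rw [List.drop_eq_nil_of_le (by omega)]
      simp [segD_self]
  | succ m ihm =>
    intro k hk htrue
    have hkE : k < E := by omega
    have hka : areas.getD k false = true := htrue k le_rfl hkE
    have hkalen : k < areas.length := by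
      by_contra hc
      rw [List.getD_eq_default _ _ (by omega)] at hka
      exact Bool.false_ne_true hka
    have hkzip : k < (areas.zip values).length := by
      have : (areas.zip values).length = min areas.length values.length := List.length_zip
      omega
    rw [List.drop_eq_getElem_cons hkzip]
    have htrue' : (areas.zip values)[k].1 = true := by
      rw [List.getElem_zip]
      rw [← List.getD_eq_getElem areas false hkalen]
      exact hka
    rw [List.takeWhile_cons, List.dropWhile_cons, htrue']
    have ih := ihm (k + 1) (by omega) (fun j h1 h2 => htrue j (by omega) h2)
    simp only [if_true]
    constructor
    · rw [List.map_cons, ih.1]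
      rw [segD_cons values k E hkE]
      congr 1
      rw [List.getElem_zip]
      exact (List.getD_eq_getElem values 0 (by omega)).symm
    · exact ih.2

-- unfolding D_'s scan across one whole True-run
lemma lastRunWins_run (areas : List Bool) (values : List Int) (i : Nat) (b : Int)
    (hi : i < areas.length) (ha : areas.getD i false = true)
    (hpre : ∀ j, j < areas.length → areas.getD j false = true → j < values.length) :
    lastRunWins ((areas.zip values).drop i) b =
      (if b < runDiffD values i (runEndD areas i) then
        ((((areas.zip values).drop (runEndD areas i)).isEmpty)
          || lastRunWins ((areas.zip values).drop (runEndD areas i))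
              (runDiffD values i (runEndD areas i)))
      else lastRunWins ((areas.zip values).drop (runEndD areas i)) b) := by
  have hE1 : runEndD areas i = runEndD areas (i + 1) := by
    rw [runEndD_eq, if_pos ⟨hi, ha⟩]
  have hiE : i < runEndD areas i := by
    have := runEndD_le areas (i + 1); omega
  have hElen : runEndD areas i ≤ areas.length := runEndD_le_len areas i (by omega)
  have hEf : areas.getD (runEndD areas i) false = false := runEndD_end_false areas i
  have htrue : ∀ j, i ≤ j → j < runEndD areas i → areas.getD j false = true :=
    fun j h1 h2 => runEndD_all_true areas i j h1 h2
  have hEV : runEndD areas i ≤ values.length := by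
    have := hpre (runEndD areas i - 1) (by omega) (htrue _ (by omega) (by omega))
    omega
  have hiV : i < values.length := hpre i hi ha
  have hizip : i < (areas.zip values).length := by
    have : (areas.zip values).length = min areas.length values.length := List.length_zip
    omega
  rw [List.drop_eq_getElem_cons hizip]
  have hsplit := zip_run_split areas values (runEndD areas i) hEf hEV
    (runEndD areas i - (i + 1)) (i + 1) (by omega) (fun j h1 h2 => htrue j (by omega) h2)
  have hhead : (areas.zip values)[i] = (true, values.getD i 0) := by
    rw [List.getElem_zip]
    rw [← List.getD_eq_getElem areas false hi, ← List.getD_eq_getElem values 0 hiV, ha]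
  rw [hhead, lastRunWins_cons_true, hsplit.1, hsplit.2]
  have hdval : (values.getD i 0 :: segD values (i + 1) (runEndD areas i)).max?.getD 0
      - (values.getD i 0 :: segD values (i + 1) (runEndD areas i)).min?.getD 0
      = runDiffD values i (runEndD areas i) := by
    unfold runDiffD
    rw [segD_cons values i (runEndD areas i) hiE]
    simp [List.max?, List.min?, listMax, listMin]
  rw [hdval]

-- unfolding D_'s scan across a False position
lemma lastRunWins_skip (areas : List Bool) (values : List Int) (i : Nat) (b : Int)
    (ha : areas.getD i false = false) :
    lastRunWins ((areas.zip values).drop i) b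
      = lastRunWins ((areas.zip values).drop (i + 1)) b := by
  by_cases hlt : i < (areas.zip values).length
  · rw [List.drop_eq_getElem_cons hlt]
    have hzl : (areas.zip values).length = min areas.length values.length := List.length_zip
    have hfalse : (areas.zip values)[i].1 = false := by
      rw [List.getElem_zip]
      rw [← List.getD_eq_getElem areas false (by omega)]
      exact ha
    have : (areas.zip values)[i] = (false, (areas.zip values)[i].2) := by
      exact Prod.ext hfalse rfl
    rw [this, lastRunWins_cons_false]
  · rw [List.drop_eq_nil_of_le (by omega), List.drop_eq_nil_of_le (by omega)]

-- ---- A's fold over a run tail does nothing ----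
lemma run_tail (areas : List Bool) (values : List Int) (E : Nat)
    (hEf : areas.getD E false = false) :
    ∀ m k (q : Int) (g : Int × Int × Int) (bo : Bool), k + m = E →
      (∀ j, k ≤ j → j < E → areas.getD j false = true) →
      (∀ j, k ≤ j → j < E → runDiffD values j E ≤ g.2.2) →
      (List.range' k m).foldl (stepA areas values) (q, g, bo)
        = ((if k < E ∧ E < areas.length then ((E : Int) - 1) else q), g, bo) := by
  intro m
  induction m with
  | zero =>
    intro k q g bo hk _ _
    rw [if_neg (by omega : ¬ (k < E ∧ E < areas.length))]
    rfl
  | succ m ih =>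
    intro k q g bo hk htrue hg
    have hkE : k < E := by omega
    have hak : areas.getD k false = true := htrue k le_rfl hkE
    have hkend : runEndD areas k = E :=
      runEndD_reach areas E hEf k (by omega) (fun t h1 h2 => htrue t h1 h2)
    rw [List.range'_succ, List.foldl_cons, stepA_diff areas values q g bo k hak]
    simp only [hkend]
    rw [if_neg (show ¬ runDiffD values k E > g.2.2 by have := hg k le_rfl hkE; omega)]
    have := ih (k + 1) (if E < areas.length then ((E : Int) - 1) else q) g bo (by omega)
      (fun j h1 h2 => htrue j (by omega) h2) (fun j h1 h2 => hg j (by omega) h2)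
    rw [this]
    by_cases hElen : E < areas.length
    · rw [if_pos (And.intro hkE hElen)]
      by_cases hk1 : k + 1 < E
      · rw [if_pos (And.intro hk1 hElen)]
      · rw [if_neg (fun (hc : k + 1 < E ∧ E < areas.length) => hk1 hc.1), if_pos hElen]
    · rw [if_neg (fun (hc : k + 1 < E ∧ E < areas.length) => hElen hc.2), if_neg hElen,
        if_neg (fun (hc : k < E ∧ E < areas.length) => hElen hc.2)]

-- ---- main induction: A's single pass equals B's run loop outside the bad region ----
lemma loop_eq (areas : List Bool) (values : List Int)
    (hpre : ∀ j, j < areas.length → areas.getD j false = true → j < values.length) :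
    ∀ fuel i (p1 : Int) (f : Int × Int × Int) (fl : Bool),
      areas.length - i ≤ fuel →
      (i = 0 ∨ areas.getD (i - 1) false = false ∨ areas.getD i false = false) →
      (areas.getLast? = some true →
        lastRunWins ((areas.zip values).drop i) f.2.2 = false) →
      ((List.range' i (areas.length - i)).foldl (stepA areas values) (p1, f, fl)).2.1
        = bLoop areas values i f := by
  intro fuel
  induction fuel with
  | zero =>
    intro i p1 f fl hfuel hb hbad
    rw [show areas.length - i = 0 from by omega, bLoop_stop areas values i f (by omega)]
    rfl
  | succ n ihf =>
    intro i p1 f fl hfuel hb hbad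
    by_cases hi : i < areas.length
    · by_cases ha : areas.getD i false = true
      · -- a True run starts or continues at i; in fact i is where A scans the run suffix
        have hE1 : runEndD areas i = runEndD areas (i + 1) := by
          rw [runEndD_eq, if_pos ⟨hi, ha⟩]
        have hiE : i < runEndD areas i := by
          have := runEndD_le areas (i + 1); omega
        have hElen : runEndD areas i ≤ areas.length := runEndD_le_len areas i (by omega)
        have hEf : areas.getD (runEndD areas i) false = false := runEndD_end_false areas i
        have htrue : ∀ j, i ≤ j → j < runEndD areas i → areas.getD j false = true :=
          fun j h1 h2 => runEndD_all_true areas i j h1 h2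
        have hsub1 : i + (runEndD areas i - i) = runEndD areas i := by omega
        have hsub2 : (runEndD areas i - i) + (areas.length - runEndD areas i)
            = areas.length - i := by omega
        rw [← hsub2, ← List.range'_append_1, hsub1, List.foldl_append]
        have hcons : List.range' i (runEndD areas i - i)
            = i :: List.range' (i + 1) (runEndD areas i - (i + 1)) := by
          rw [show runEndD areas i - i = (runEndD areas i - (i + 1)) + 1 from by omega,
            List.range'_succ]
        rw [hcons, List.foldl_cons, stepA_diff areas values p1 f fl i ha]
        have hmono : ∀ j, i + 1 ≤ j → j < runEndD areas i →
            runDiffD values j (runEndD areas i) ≤ runDiffD values i (runEndD areas i) :=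
          fun j h1 h2 => runDiffD_suffix_le values i j (runEndD areas i) (by omega) h2
        by_cases hfire : runDiffD values i (runEndD areas i) > f.2.2
        · rw [if_pos hfire]
          rw [run_tail areas values (runEndD areas i) hEf (runEndD areas i - (i + 1)) (i + 1)
            _ _ _ (by omega) (fun j h1 h2 => htrue j (by omega) h2)
            (fun j h1 h2 => by simpa using hmono j h1 h2)]
          by_cases hElt : runEndD areas i < areas.length
          · -- closed winning run: states coincide
            rw [bLoop_run areas values i f hi ha, if_pos hfire]
            rw [if_pos hElt]
            rw [ite_self]
            exact ihf (runEndD areas i) _ _ _ (by omega) (Or.inr (Or.inr hEf))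
              (fun hg => by
                have hh := hbad hg
                rw [lastRunWins_run areas values i f.2.2 hi ha hpre, if_pos hfire] at hh
                exact (Bool.or_eq_false_iff.mp hh).2)
          · -- the winning run reaches the end of the list: contradicts ¬ badFrom
            exfalso
            have hEeq : runEndD areas i = areas.length := by omega
            have hlast : areas.getLast? = some true := by
              rw [List.getLast?_eq_getElem?, List.getElem?_eq_getElem (by omega)]
              congr 1
              rw [← List.getD_eq_getElem areas false (by omega)]
              exact htrue (areas.length - 1) (by omega) (by omega)
            have hh := hbad hlast
            rw [lastRunWins_run areas values i f.2.2 hi ha hpre, if_pos hfire] at hh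
            have hnil : (areas.zip values).drop (runEndD areas i) = [] :=
              List.drop_eq_nil_of_le (by
                have : (areas.zip values).length = min areas.length values.length :=
                  List.length_zip
                omega)
            rw [hnil] at hh
            simp at hh
        · rw [if_neg hfire]
          rw [run_tail areas values (runEndD areas i) hEf (runEndD areas i - (i + 1)) (i + 1)
            _ _ _ (by omega) (fun j h1 h2 => htrue j (by omega) h2)
            (fun j h1 h2 => by have := hmono j h1 h2; omega)]
          rw [bLoop_run areas values i f hi ha, if_neg hfire]
          exact ihf (runEndD areas i) _ _ _ (by omega) (Or.inr (Or.inr hEf))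
            (fun hg => by
              have hh := hbad hg
              rw [lastRunWins_run areas values i f.2.2 hi ha hpre, if_neg hfire] at hh
              exact hh)
      · -- skip a False position
        have ha' : areas.getD i false = false := by
          cases hb2 : areas.getD i false with
          | false => rfl
          | true => exact absurd hb2 ha
        have hcons : List.range' i (areas.length - i)
            = i :: List.range' (i + 1) (areas.length - (i + 1)) := by
          rw [show areas.length - i = (areas.length - (i + 1)) + 1 from by omega,
            List.range'_succ]
        rw [hcons, List.foldl_cons]
        rw [show stepA areas values (p1, f, fl) i = (p1, f, fl) from by
          unfold stepA; rw [if_neg ha]]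
        rw [bLoop_skip areas values i f hi ha']
        exact ihf (i + 1) p1 f fl (by omega) (Or.inr (Or.inl (by simpa using ha')))
          (fun hg => by
            rw [← lastRunWins_skip areas values i f.2.2 ha']
            exact hbad hg)
    · rw [show areas.length - i = 0 from by omega, bLoop_stop areas values i f (by omega)]
      rfl

-- ---- the while-flag loop stabilises after the second pass ----
def diffOf (areas : List Bool) (values : List Int) (i : Nat) : Int :=
  runDiffD values i (runEndD areas i)

def maxOver (areas : List Bool) (values : List Int) (l : List Nat) : Int :=
  l.foldr (fun i m => if areas.getD i false = true then max (diffOf areas values i) m else m) 0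

lemma pass_bounds (areas : List Bool) (values : List Int) (l : List Nat) :
    ∀ (p1 : Int) (f : Int × Int × Int) (fl : Bool),
      f.2.2 ≤ (l.foldl (stepA areas values) (p1, f, fl)).2.1.2.2 ∧
      maxOver areas values l ≤ max 0 (l.foldl (stepA areas values) (p1, f, fl)).2.1.2.2 := by
  induction l with
  | nil =>
    intro p1 f fl
    exact ⟨le_rfl, by unfold maxOver; simp⟩
  | cons i t ih =>
    intro p1 f fl
    have hmo : maxOver areas values (i :: t)
        = if areas.getD i false = true then max (diffOf areas values i) (maxOver areas values t)
          else maxOver areas values t := rfl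
    rw [List.foldl_cons, hmo]
    by_cases ha : areas.getD i false = true
    · rw [if_pos ha, stepA_diff areas values p1 f fl i ha]
      by_cases hfire : runDiffD values i (runEndD areas i) > f.2.2
      · rw [if_pos hfire]
        have := ih (if runEndD areas i < areas.length then ((runEndD areas i : Int) - 1) else p1)
          ((i : Int), (if runEndD areas i < areas.length then ((runEndD areas i : Int) - 1) else p1),
            runDiffD values i (runEndD areas i)) true
        refine ⟨by have h1 := this.1; simp only [] at h1 ⊢; omega, ?_⟩
        have h1 := this.1
        have h2 := this.2
        simp only [] at h1 h2 ⊢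
        have hdo : diffOf areas values i = runDiffD values i (runEndD areas i) := rfl
        rw [hdo]
        rcases max_cases (0 : Int) ((t.foldl (stepA areas values)
            ((if runEndD areas i < areas.length then ((runEndD areas i : Int) - 1) else p1),
             ((i : Int), (if runEndD areas i < areas.length then ((runEndD areas i : Int) - 1) else p1),
              runDiffD values i (runEndD areas i)), true)).2.1.2.2) with ⟨he, _⟩ | ⟨he, _⟩ <;>
          rcases max_cases (runDiffD values i (runEndD areas i)) (maxOver areas values t) with ⟨he2, _⟩ | ⟨he2, _⟩ <;>
          omega
      · rw [if_neg hfire]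
        have := ih (if runEndD areas i < areas.length then ((runEndD areas i : Int) - 1) else p1)
          f fl
        refine ⟨this.1, ?_⟩
        have h1 := this.1
        have h2 := this.2
        have hdo : diffOf areas values i = runDiffD values i (runEndD areas i) := rfl
        rw [hdo]
        rcases max_cases (0 : Int) ((t.foldl (stepA areas values)
            ((if runEndD areas i < areas.length then ((runEndD areas i : Int) - 1) else p1),
             f, fl)).2.1.2.2) with ⟨he, _⟩ | ⟨he, _⟩ <;>
          rcases max_cases (runDiffD values i (runEndD areas i)) (maxOver areas values t) with ⟨he2, _⟩ | ⟨he2, _⟩ <;>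
          omega
    · rw [if_neg ha, show stepA areas values (p1, f, fl) i = (p1, f, fl) from by
        unfold stepA; rw [if_neg ha]]
      exact ih p1 f fl

lemma pass_noop (areas : List Bool) (values : List Int) (l : List Nat) :
    ∀ (p1 : Int) (f : Int × Int × Int) (fl : Bool), maxOver areas values l ≤ f.2.2 →
      (l.foldl (stepA areas values) (p1, f, fl)).2.1 = f ∧
      (l.foldl (stepA areas values) (p1, f, fl)).2.2 = fl := by
  induction l with
  | nil => intro p1 f fl _; exact ⟨rfl, rfl⟩
  | cons i t ih =>
    intro p1 f fl hle
    have hmo : maxOver areas values (i :: t)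
        = if areas.getD i false = true then max (diffOf areas values i) (maxOver areas values t)
          else maxOver areas values t := rfl
    rw [hmo] at hle
    rw [List.foldl_cons]
    by_cases ha : areas.getD i false = true
    · rw [if_pos ha] at hle
      have hdle : diffOf areas values i ≤ f.2.2 := le_trans (le_max_left _ _) hle
      have htle : maxOver areas values t ≤ f.2.2 := le_trans (le_max_right _ _) hle
      rw [stepA_diff areas values p1 f fl i ha]
      rw [if_neg (show ¬ runDiffD values i (runEndD areas i) > f.2.2 from by
        have : diffOf areas values i = runDiffD values i (runEndD areas i) := rfl
        omega)]
      exact ih _ f fl htle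
    · rw [if_neg ha] at hle
      rw [show stepA areas values (p1, f, fl) i = (p1, f, fl) from by
        unfold stepA; rw [if_neg ha]]
      exact ih p1 f fl hle

lemma whileGo_two (areas : List Bool) (values : List Int) :
    whileGo areas values 2 0 (0, 0, 0) = (passA areas values 0 (0, 0, 0)).2.1 := by
  have hb : (0 : Int) ≤ (passA areas values 0 (0, 0, 0)).2.1.2.2 ∧
      maxOver areas values (List.range areas.length)
        ≤ max 0 (passA areas values 0 (0, 0, 0)).2.1.2.2 :=
    pass_bounds areas values (List.range areas.length) 0 (0, 0, 0) false
  have hle : maxOver areas values (List.range areas.length)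
      ≤ (passA areas values 0 (0, 0, 0)).2.1.2.2 := by
    rcases max_cases (0 : Int) ((passA areas values 0 (0, 0, 0)).2.1.2.2) with ⟨he, _⟩ | ⟨he, _⟩ <;>
      omega
  have hnoop := pass_noop areas values (List.range areas.length)
    (passA areas values 0 (0, 0, 0)).1 (passA areas values 0 (0, 0, 0)).2.1 false hle
  have hflag2 : (passA areas values (passA areas values 0 (0, 0, 0)).1
      (passA areas values 0 (0, 0, 0)).2.1).2.2 = false := hnoop.2
  have hres2 : (passA areas values (passA areas values 0 (0, 0, 0)).1
      (passA areas values 0 (0, 0, 0)).2.1).2.1 = (passA areas values 0 (0, 0, 0)).2.1 := hnoop.1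
  simp only [whileGo]
  by_cases h1 : (passA areas values 0 (0, 0, 0)).2.2 = true
  · rw [if_pos h1,
      if_neg (fun hc => Bool.false_ne_true (hflag2 ▸ hc)), hres2]
  · rw [if_neg h1]

-- ===== VERDICT (by name: the statement is the Claim_ definition above) =====
theorem find_license_plate_spec : Claim_unchanged_find_license_plate := by
  intro areas values _hdom hpre hnd
  have hpre' : ∀ j, j < areas.length → areas.getD j false = true → j < values.length :=
    fun j hj ht => hpre j (List.mem_range.mpr hj) ht
  have hbad : areas.getLast? = some true →
      lastRunWins ((areas.zip values).drop 0) (0 : Int) = false := by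
    intro hg
    rw [List.drop_zero]
    cases hl : lastRunWins (areas.zip values) 0 with
    | false => rfl
    | true => exact absurd ⟨hg, hl⟩ hnd
  have hmain : (passA areas values 0 (0, 0, 0)).2.1 = bLoop areas values 0 (0, 0, 0) := by
    unfold passA
    rw [List.range_eq_range']
    have := loop_eq areas values hpre' areas.length 0 0 (0, 0, 0) false (by omega)
      (Or.inl rfl) hbad
    rw [Nat.sub_zero] at this
    exact this
  unfold find_license_plate find_license_plate_alt
  rw [whileGo_two, hmain]

theorem find_license_plate_changed : Claim_changed_find_license_plate := by
  unfold Claim_changed_find_license_plate; decide
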